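-- pv_equiv track=rewrite | github.com/j-rewerts/practice-problems | sort-stack-3.5/sort-stack.py | moveLargest
-- ===== SOURCE A (Python) =====
-- def moveLargest(stack, ignorePast=99999):
--   flippedStack = []
--   biggest = -999999
--
--   if ignorePast == stack[-1]:
--     return True, biggest
--
--   while stack and stack[-1] < ignorePast:
--     value = stack.pop()
--     if value > biggest:
--       if biggest != -999999:
--         flippedStack.append(biggest)
--       biggest = value
--     else:
--       flippedStack.append(value)
--   stack.append(biggest)
--
--   while flippedStack:
--     stack.append(flippedStack.pop())
--   return False, biggest
-- ===== SOURCE B (Python) =====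
-- def moveLargest(stack, ignorePast=99999):
--   # Return-value equivalence only: B also mutates `stack`, but the re-push
--   # order of the non-max elements may differ from A's.
--   if ignorePast == stack[-1]:
--     return True, -999999
--
--   popped = []
--   while stack and stack[-1] < ignorePast:
--     popped.append(stack.pop())
--
--   biggest = max([-999999] + popped)
--   if biggest > -999999:
--     popped.remove(biggest)
--   stack.append(biggest)
--   while popped:
--     stack.append(popped.pop())
--   return False, biggest
-- ===== Notes on version B (the rewrite author's own statement) =====
-- stated objective: simpler
-- what changed: B pops the whole qualifying prefix into a list first, then takes its max with the builtin and removes the topmost occurrence, instead of A's single interleaved pass with a running max and incremental buffering; equivalence is about the return value only (re-push order of non-max elements into the mutated stack may differ).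
import Mathlib
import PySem

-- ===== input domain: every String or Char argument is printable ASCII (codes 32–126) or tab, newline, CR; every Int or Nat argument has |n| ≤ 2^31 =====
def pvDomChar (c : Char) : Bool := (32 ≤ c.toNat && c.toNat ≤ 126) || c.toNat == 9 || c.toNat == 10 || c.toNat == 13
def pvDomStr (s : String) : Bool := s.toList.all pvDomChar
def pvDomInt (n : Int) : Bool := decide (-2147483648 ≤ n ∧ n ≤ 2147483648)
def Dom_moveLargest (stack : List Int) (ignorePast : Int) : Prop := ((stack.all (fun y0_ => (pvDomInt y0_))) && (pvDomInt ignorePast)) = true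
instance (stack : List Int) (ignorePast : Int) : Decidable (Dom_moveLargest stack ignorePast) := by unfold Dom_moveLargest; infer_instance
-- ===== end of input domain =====

-- B gathers the poppable prefix first and then takes its max with the builtin,
-- instead of A's interleaved running-max buffering; equivalence is about the
-- RETURN value only (both mutate `stack`, but B's re-push order of the
-- non-max elements can differ from A's).

-- ===== PORT A =====
-- A's while-loop, on the stack viewed top-first (rev = reversed stack);
-- state (flipped, biggest) exactly as in the Python.
def moveLargestLoopA (rev : List Int) (flipped : List Int) (biggest : Int)
    (ignorePast : Int) : List Int × Int :=
  match rev with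
  | [] => (flipped, biggest)
  | value :: rest =>
    if value < ignorePast then
      if value > biggest then
        moveLargestLoopA rest
          (if biggest ≠ -999999 then flipped ++ [biggest] else flipped) value ignorePast
      else
        moveLargestLoopA rest (flipped ++ [value]) biggest ignorePast
    else (flipped, biggest)

def moveLargest (stack : List Int) (ignorePast : Int) : Bool × Int :=
  match PySem.List.pyGet? stack (-1) with
  | none => (false, -999999)   -- Python raises IndexError here; excluded by Pre_
  | some last =>
    if ignorePast = last then (true, -999999)
    else
      let st := moveLargestLoopA stack.reverse [] (-999999) ignorePast
      (false, st.2)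

-- ===== PORT B =====
def moveLargest_alt (stack : List Int) (ignorePast : Int) : Bool × Int :=
  match PySem.List.pyGet? stack (-1) with
  | none => (false, -999999)   -- Python raises IndexError here; excluded by Pre_
  | some last =>
    if ignorePast = last then (true, -999999)
    else
      let popped := stack.reverse.takeWhile (fun v => v < ignorePast)
      let biggest := List.foldl max (-999999) popped
      (false, biggest)

-- ===== PRECONDITION & SPEC =====
-- Pre_ excludes only the empty stack, on which Python A raises IndexError.
def Pre_moveLargest (stack : List Int) (ignorePast : Int) : Prop := stack ≠ []
instance (stack : List Int) (ignorePast : Int) : Decidable (Pre_moveLargest stack ignorePast) := by unfold Pre_moveLargest; infer_instance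
def pvWitness_moveLargest : List Int × Int := ([3, 1, 2], 99999)

def Spec_moveLargest (stack : List Int) (ignorePast : Int) (out : Bool × Int) : Prop := out = moveLargest_alt stack ignorePast
instance (stack : List Int) (ignorePast : Int) (out : Bool × Int) : Decidable (Spec_moveLargest stack ignorePast out) := by unfold Spec_moveLargest; infer_instance

-- ===== CLAIM (what is proved, stated in full; the proofs are below) =====
def Claim_equal_moveLargest : Prop := ∀ (stack : List Int) (ignorePast : Int), Dom_moveLargest stack ignorePast → Pre_moveLargest stack ignorePast → Spec_moveLargest stack ignorePast (moveLargest stack ignorePast)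

-- ===== LEMMAS AND PROOFS =====

-- A's loop returns as `biggest` the running max, i.e. the fold of max over the
-- popped (takeWhile) prefix, independently of `flipped`.
theorem moveLargestLoopA_snd (rev : List Int) : ∀ (flipped : List Int) (biggest ignorePast : Int),
    (moveLargestLoopA rev flipped biggest ignorePast).2
      = List.foldl max biggest (rev.takeWhile (fun v => v < ignorePast)) := by
  induction rev with
  | nil => intro flipped biggest ignorePast; simp [moveLargestLoopA]
  | cons v rest ih =>
    intro flipped biggest ignorePast
    by_cases h : v < ignorePast
    · have htw : (v :: rest).takeWhile (fun v => v < ignorePast)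
          = v :: rest.takeWhile (fun v => v < ignorePast) := by
        simp [List.takeWhile, h]
      by_cases hg : v > biggest
      · have hmax : max biggest v = v := by omega
        simp [moveLargestLoopA, h, hg, htw, ih, hmax]
      · have hmax : max biggest v = biggest := by omega
        simp [moveLargestLoopA, h, hg, htw, ih, hmax]
    · have htw : (v :: rest).takeWhile (fun v => v < ignorePast) = [] := by
        simp [List.takeWhile, h]
      simp [moveLargestLoopA, h, htw]

-- ===== VERDICT (by name: the statement is the Claim_ definition above) =====
theorem moveLargest_spec : Claim_equal_moveLargest := by
  intro stack ignorePast _ _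
  unfold Spec_moveLargest moveLargest moveLargest_alt
  cases PySem.List.pyGet? stack (-1) with
  | none => rfl
  | some last =>
    by_cases h : ignorePast = last
    · simp [h]
    · simp [h, moveLargestLoopA_snd]
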